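-- pv_equiv track=rewrite | github.com/Nikhil-Nevix/Jade_Global_Automation_Hub | backend/app/utils/file_manager.py | auto_detect_main_playbook
-- ===== SOURCE A (Python) =====
-- from typing import Dict, List, Tuple, Optional
--
-- def auto_detect_main_playbook(yaml_files: List[str]) -> Optional[str]:
--     """
--     Auto-detect main playbook file from list of YAML files
--
--     Priority:
--     1. site.yml or site.yaml
--     2. main.yml or main.yaml
--     3. playbook.yml or playbook.yaml
--     4. First .yml/.yaml file in root directory
--
--     Args:
--         yaml_files: List of relative paths to YAML files
--
--     Returns:
--         Path to main playbook or None
--     """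
--     if not yaml_files:
--         return None
--
--     # Priority filenames
--     priority_names = ['site.yml', 'site.yaml', 'main.yml', 'main.yaml', 'playbook.yml', 'playbook.yaml']
--
--     # Check for priority names
--     for priority in priority_names:
--         if priority in yaml_files:
--             return priority
--
--     # Return first file in root directory
--     root_files = [f for f in yaml_files if '/' not in f and '\\' not in f]
--     if root_files:
--         return root_files[0]
--
--     # Fallback to first file
--     return yaml_files[0]
-- ===== SOURCE B (Python) =====
-- from typing import Dict, List, Tuple, Optional
--
-- def auto_detect_main_playbook(yaml_files: List[str]) -> Optional[str]:
--     if not yaml_files: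
--         return None
--     priority_names = ['site.yml', 'site.yaml', 'main.yml', 'main.yaml', 'playbook.yml', 'playbook.yaml']
--     rank = {name: i for i, name in enumerate(priority_names)}
--     best_rank = None
--     first_root = None
--     for f in yaml_files:
--         r = rank.get(f)
--         if r is not None and (best_rank is None or r < best_rank):
--             best_rank = r
--         if first_root is None and '/' not in f and '\\' not in f:
--             first_root = f
--     if best_rank is not None:
--         return priority_names[best_rank]
--     if first_root is not None:
--         return first_root
--     return yaml_files[0]
-- ===== Notes on version B (the rewrite author's own statement) =====
-- stated objective: alternative
-- what changed: Replaces A's six sequential priority-membership scans over yaml_files plus a separate root-file comprehension with one pass over yaml_files maintaining the minimum priority rank (via a name->rank dict) and the first root file.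
import Mathlib
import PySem

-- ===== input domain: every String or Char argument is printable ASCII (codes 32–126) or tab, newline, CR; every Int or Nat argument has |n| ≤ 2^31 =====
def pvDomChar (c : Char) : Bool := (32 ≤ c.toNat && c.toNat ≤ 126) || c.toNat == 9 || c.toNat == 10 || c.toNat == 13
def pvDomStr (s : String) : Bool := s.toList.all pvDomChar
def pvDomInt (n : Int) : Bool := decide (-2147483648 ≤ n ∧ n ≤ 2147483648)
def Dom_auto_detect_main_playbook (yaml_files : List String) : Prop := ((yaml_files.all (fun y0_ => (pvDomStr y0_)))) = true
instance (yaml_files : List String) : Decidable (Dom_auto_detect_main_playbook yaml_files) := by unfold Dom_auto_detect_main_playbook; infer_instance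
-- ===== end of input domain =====

-- B replaces A's six priority-membership scans plus a root-file comprehension by a single
-- pass over yaml_files maintaining the best priority rank and the first root file (objective: alternative).

-- shared helper: Python "'/' not in f and '\\' not in f"
def pvNoSep (f : String) : Bool := !(PySem.Str.isIn "/" f) && !(PySem.Str.isIn "\\" f)

def pvPriorityNames : List String :=
  ["site.yml", "site.yaml", "main.yml", "main.yaml", "playbook.yml", "playbook.yaml"]

-- ===== PORT A =====
def auto_detect_main_playbook (yaml_files : List String) : Option String :=
  if yaml_files = [] then none
  else
    -- for priority in priority_names: if priority in yaml_files: return priority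
    match pvPriorityNames.find? (fun p => yaml_files.contains p) with
    | some p => some p
    | none =>
      let root_files := yaml_files.filter pvNoSep
      if root_files ≠ [] then PySem.List.pyGet? root_files 0
      else PySem.List.pyGet? yaml_files 0

-- ===== PORT B =====
-- rank.get(f) on the dict {name: i}
def pvRankOf (f : String) : Option Nat :=
  if f = "site.yml" then some 0
  else if f = "site.yaml" then some 1
  else if f = "main.yml" then some 2
  else if f = "main.yaml" then some 3
  else if f = "playbook.yml" then some 4
  else if f = "playbook.yaml" then some 5
  else none

-- one loop iteration of B: update (best_rank, first_root)
def pvStep (s : Option Nat × Option String) (f : String) : Option Nat × Option String :=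
  let best :=
    match pvRankOf f, s.1 with
    | some r, none => some r
    | some r, some b => if r < b then some r else some b
    | none, _ => s.1
  let root :=
    match s.2 with
    | some x => some x
    | none => if pvNoSep f then some f else none
  (best, root)

def auto_detect_main_playbook_alt (yaml_files : List String) : Option String :=
  if yaml_files = [] then none
  else
    let st := yaml_files.foldl pvStep (none, none)
    match st.1 with
    | some r => some (pvPriorityNames.getD r "")
    | none =>
      match st.2 with
      | some f => some f
      | none => PySem.List.pyGet? yaml_files 0

-- ===== PRECONDITION & SPEC =====
def Spec_auto_detect_main_playbook (yaml_files : List String) (out : Option String) : Prop := out = auto_detect_main_playbook_alt yaml_files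
instance (yaml_files : List String) (out : Option String) : Decidable (Spec_auto_detect_main_playbook yaml_files out) := by unfold Spec_auto_detect_main_playbook; infer_instance

-- ===== CLAIM (what is proved, stated in full; the proofs are below) =====
def Claim_equal_auto_detect_main_playbook : Prop := ∀ (yaml_files : List String), Dom_auto_detect_main_playbook yaml_files → Spec_auto_detect_main_playbook yaml_files (auto_detect_main_playbook yaml_files)

-- ===== LEMMAS AND PROOFS =====

-- merge of two optional ranks, keeping the minimum
def pvMMin : Option Nat → Option Nat → Option Nat
  | none, y => y
  | some a, none => some a
  | some a, some b => some (min a b)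

theorem pvMMin_assoc (x y z : Option Nat) : pvMMin (pvMMin x y) z = pvMMin x (pvMMin y z) := by
  cases x <;> cases y <;> cases z <;> simp [pvMMin, Nat.min_assoc]

-- project the fold into its two independent components
theorem pvFold_pair (xs : List String) (b : Option Nat) (r : Option String) :
    xs.foldl pvStep (b, r) =
      (xs.foldl (fun b f => pvMMin b (pvRankOf f)) b,
       xs.foldl (fun r f => r.orElse (fun _ => if pvNoSep f then some f else none)) r) := by
  induction xs generalizing b r with
  | nil => rfl
  | cons f t ih =>
    simp only [List.foldl_cons]
    rw [show pvStep (b, r) f =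
        (pvMMin b (pvRankOf f), r.orElse (fun _ => if pvNoSep f then some f else none)) from ?_,
      ih]
    cases hb : b <;> cases hr : r <;> cases hf : pvRankOf f <;>
      simp only [pvStep, pvMMin, Option.orElse, hf] <;>
      first
      | rfl
      | (split_ifs <;> simp [Nat.min_def] <;> omega)

-- the minimum-rank fold, recursively
def pvM : List String → Option Nat
  | [] => none
  | f :: t => pvMMin (pvRankOf f) (pvM t)

theorem pvFold_mmin (xs : List String) (b : Option Nat) :
    xs.foldl (fun b f => pvMMin b (pvRankOf f)) b = pvMMin b (pvM xs) := by
  induction xs generalizing b with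
  | nil => cases b <;> simp [pvM, pvMMin]
  | cons f t ih => simp only [List.foldl_cons, pvM, ih, pvMMin_assoc]

-- characterisation of the minimum rank as A's if-chain of memberships
def pvChain (xs : List String) : Option Nat :=
  if "site.yml" ∈ xs then some 0
  else if "site.yaml" ∈ xs then some 1
  else if "main.yml" ∈ xs then some 2
  else if "main.yaml" ∈ xs then some 3
  else if "playbook.yml" ∈ xs then some 4
  else if "playbook.yaml" ∈ xs then some 5
  else none

theorem pvM_eq_chain (xs : List String) : pvM xs = pvChain xs := by
  induction xs with
  | nil => simp [pvM, pvChain]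
  | cons f t ih =>
    simp only [pvM, ih, pvChain, List.mem_cons]
    by_cases h0 : f = "site.yml" <;> by_cases h1 : f = "site.yaml" <;>
      by_cases h2 : f = "main.yml" <;> by_cases h3 : f = "main.yaml" <;>
      by_cases h4 : f = "playbook.yml" <;> by_cases h5 : f = "playbook.yaml" <;>
      simp_all [pvRankOf] <;>
      split_ifs <;> simp_all [pvMMin]

-- the first-root fold is find?
theorem pvFold_root (xs : List String) (r : Option String) :
    xs.foldl (fun r f => r.orElse (fun _ => if pvNoSep f then some f else none)) r =
      r.orElse (fun _ => xs.find? pvNoSep) := by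
  induction xs generalizing r with
  | nil => cases r <;> rfl
  | cons f t ih =>
    simp only [List.foldl_cons, ih]
    cases r with
    | some x => rfl
    | none =>
      by_cases h : pvNoSep f <;> simp [List.find?, h, Option.orElse]

-- fallback branch: first root file, else first file
theorem pvRoot_case (xs : List String) :
    (if xs.filter pvNoSep ≠ [] then PySem.List.pyGet? (xs.filter pvNoSep) 0
     else PySem.List.pyGet? xs 0)
    = match xs.find? pvNoSep with
      | some f => some f
      | none => PySem.List.pyGet? xs 0 := by
  rw [← List.head?_filter]
  cases hf : xs.filter pvNoSep with
  | nil => simp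
  | cons a l => simp

-- A's priority loop equals the membership if-chain pvChain
theorem pvFind_eq_chain (xs : List String) :
    pvPriorityNames.find? (fun p => xs.contains p) =
      (pvChain xs).map (fun r => pvPriorityNames.getD r "") := by
  by_cases c0 : "site.yml" ∈ xs <;> by_cases c1 : "site.yaml" ∈ xs <;>
    by_cases c2 : "main.yml" ∈ xs <;> by_cases c3 : "main.yaml" ∈ xs <;>
    by_cases c4 : "playbook.yml" ∈ xs <;> by_cases c5 : "playbook.yaml" ∈ xs <;>
    simp [pvPriorityNames, pvChain, c0, c1, c2, c3, c4, c5]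

-- ===== VERDICT (by name: the statement is the Claim_ definition above) =====
theorem auto_detect_main_playbook_spec : Claim_equal_auto_detect_main_playbook := by
  intro xs _
  unfold Spec_auto_detect_main_playbook auto_detect_main_playbook auto_detect_main_playbook_alt
  by_cases hx : xs = []
  · simp [hx]
  · simp only [if_neg hx]
    rw [pvFold_pair, pvFold_mmin, pvFold_root, pvM_eq_chain, pvFind_eq_chain]
    cases hc : pvChain xs with
    | some r => simp [pvMMin]
    | none =>
      simp only [pvMMin, Option.map_none, Option.orElse]
      exact pvRoot_case xs
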